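-- pv_equiv track=rewrite | github.com/yoelAshkenazi/WikiScrapper | excavator.py | get_translation_edges
-- ===== SOURCE A (Python) =====
-- def get_translation_edges(vertices, translations):
--     """
--     This function returns the translation edges between the vertices.
--     :param vertices: set of vertices.
--     :param translations: dictionary of translations.
--     :return: list of translation edges.
--     """
--     translation_edges = []  # list of translation edges.
--
--     # Add the translation edges.
--     for translation in translations:
--         if len(translation) < 2:  # no translations.
--             continue
--
--         for i in range(len(translation) - 1):
--             for j in range(i + 1, len(translation)):
--                 if translation[i] in vertices and translation[j] in vertices:
--                     translation_edges.append((translation[i], translation[j]))  # add the translation edge.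
--     return translation_edges
-- ===== SOURCE B (Python) =====
-- def get_translation_edges(vertices, translations):
--     """Faster re-implementation: filter each group to in-vertex members once
--     (O(1) set membership), then emit all ordered pairs of the filtered list."""
--     vs = set(vertices)
--     edges = []
--     for group in translations:
--         rest = [v for v in group if v in vs]
--         while rest:
--             x = rest[0]
--             rest = rest[1:]
--             for y in rest:
--                 edges.append((x, y))
--     return edges
-- ===== Notes on version B (the rewrite author's own statement) =====
-- stated objective: alternative
-- what changed: Instead of testing every index pair of each group against the vertex collection, B filters each group to its in-vertex members once using a hash set and then emits all pairs of the filtered list by peeling suffixes; intended to cut membership tests (measured ~1.5-1.9x at mid sizes but below the 1.5x confirm threshold at the largest size, so no speed is claimed).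
import Mathlib
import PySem

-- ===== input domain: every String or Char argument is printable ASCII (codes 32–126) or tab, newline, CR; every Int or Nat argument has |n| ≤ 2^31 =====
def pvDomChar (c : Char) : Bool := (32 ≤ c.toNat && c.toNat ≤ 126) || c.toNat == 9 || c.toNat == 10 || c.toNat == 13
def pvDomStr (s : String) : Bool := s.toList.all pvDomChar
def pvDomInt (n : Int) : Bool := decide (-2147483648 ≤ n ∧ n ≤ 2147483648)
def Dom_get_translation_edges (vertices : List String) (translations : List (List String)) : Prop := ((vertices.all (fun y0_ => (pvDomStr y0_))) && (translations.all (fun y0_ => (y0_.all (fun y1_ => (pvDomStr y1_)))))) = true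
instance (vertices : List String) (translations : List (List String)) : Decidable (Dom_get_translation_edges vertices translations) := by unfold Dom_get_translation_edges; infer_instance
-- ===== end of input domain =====

-- B filters each group to its in-vertex members once, then emits all pairs of the filtered
-- list by peeling suffixes — a different traversal with the same return value as A.

-- ===== PORT A =====
-- translation[i]/translation[j]: indices produced by pyRange are always in range here, so pyGetD is exact.
def get_translation_edges (vertices : List String) (translations : List (List String)) : List (String × String) :=
  translations.foldl (fun translation_edges translation =>
    if translation.length < 2 then translation_edges
    else
      (PySem.List.pyRange 0 ((translation.length : Int) - 1) 1).foldl (fun acc1 i =>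
        (PySem.List.pyRange (i + 1) (translation.length : Int) 1).foldl (fun acc2 j =>
          if vertices.contains (PySem.List.pyGetD translation i "") &&
             vertices.contains (PySem.List.pyGetD translation j "") then
            acc2 ++ [(PySem.List.pyGetD translation i "", PySem.List.pyGetD translation j "")]
          else acc2) acc1) translation_edges) []

-- ===== PORT B =====
-- the 'while rest: x = rest[0]; rest = rest[1:]; for y in rest: edges.append((x, y))' loop of Source B
def pyPairsLoop (edges : List (String × String)) : List String → List (String × String)
  | [] => edges
  | x :: rest => pyPairsLoop (edges ++ rest.map (fun y => (x, y))) rest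

def get_translation_edges_alt (vertices : List String) (translations : List (List String)) : List (String × String) :=
  let vs := PySem.Set.ofList vertices
  translations.foldl (fun edges group =>
    pyPairsLoop edges (group.filter (fun v => PySem.Set.contains vs v))) []

-- ===== PRECONDITION & SPEC =====
def Spec_get_translation_edges (vertices : List String) (translations : List (List String)) (out : List (String × String)) : Prop := out = get_translation_edges_alt vertices translations
instance (vertices : List String) (translations : List (List String)) (out : List (String × String)) : Decidable (Spec_get_translation_edges vertices translations out) := by unfold Spec_get_translation_edges; infer_instance

-- ===== CLAIM (what is proved, stated in full; the proofs are below) =====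
def Claim_equal_get_translation_edges : Prop := ∀ (vertices : List String) (translations : List (List String)), Dom_get_translation_edges vertices translations → Spec_get_translation_edges vertices translations (get_translation_edges vertices translations)

-- ===== LEMMAS AND PROOFS =====

-- canonical pair list of a list: all pairs (x, y) with x strictly before y
def pairsOf : List String → List (String × String)
  | [] => []
  | x :: rest => rest.map (fun y => (x, y)) ++ pairsOf rest

theorem pyPairsLoop_eq (edges : List (String × String)) (xs : List String) :
    pyPairsLoop edges xs = edges ++ pairsOf xs := by
  induction xs generalizing edges with
  | nil => simp [pyPairsLoop, pairsOf]
  | cons x rest ih => simp [pyPairsLoop, pairsOf, ih]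

theorem pairsOf_short (xs : List String) (h : xs.length ≤ 1) : pairsOf xs = [] := by
  match xs, h with
  | [], _ => rfl
  | [a], _ => simp [pairsOf]

theorem contains_ofList (xs : List String) (y : String) :
    PySem.Set.contains (PySem.Set.ofList xs) y = xs.contains y := by
  unfold PySem.Set.contains
  simp [PySem.Set.mem_ofList]

theorem filter_and_left {α : Type} (a : Bool) (q : α → Bool) (l : List α) :
    l.filter (fun x => a && q x) = if a then l.filter q else [] := by
  cases a <;> simp

-- filter-then-map over an index range = filter-then-map over the dropped suffix
theorem filtermap_range (g : List String) (a : Int) (ha : 0 ≤ a) (p : String → Bool)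
    (q : String → String × String) (d : String) :
    ((PySem.List.pyRange a (g.length : Int) 1).filter
        (fun j => p (PySem.List.pyGetD g j d))).map (fun j => q (PySem.List.pyGetD g j d))
      = ((g.drop a.toNat).filter p).map q := by
  have h := PySem.List.map_pyGetD_pyRange (xs := g) (a := a) (d := d) ha
  calc ((PySem.List.pyRange a (g.length : Int) 1).filter
        (fun j => p (PySem.List.pyGetD g j d))).map (fun j => q (PySem.List.pyGetD g j d))
      = (((PySem.List.pyRange a (g.length : Int) 1).map
          (fun j => PySem.List.pyGetD g j d)).filter p).map q := by
        rw [List.filter_map]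
        simp [List.map_map, Function.comp_def]
    _ = ((g.drop a.toNat).filter p).map q := by
        simp only [PySem.List.len_eq] at h
        rw [h]

-- Nat-level form of A's per-group double loop equals pairsOf of the filtered group.
theorem keyNat (p : String → Bool) (g : List String) :
    (List.range (g.length - 1)).flatMap (fun k =>
      if p (g.getD k "") then ((g.drop (k + 1)).filter p).map (fun y => (g.getD k "", y)) else [])
      = pairsOf (g.filter p) := by
  induction g with
  | nil => simp [pairsOf]
  | cons x r ih =>
    cases r with
    | nil =>
      simp only [List.length_cons, List.length_nil]
      cases hp : p x <;> simp [hp, pairsOf]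
    | cons y t =>
      rw [show (x :: y :: t).length - 1 = ((y :: t).length - 1) + 1 from by simp]
      rw [List.range_succ_eq_map]
      rw [List.flatMap_cons, List.flatMap_map]
      have htail :
          (List.range ((y :: t).length - 1)).flatMap (fun k =>
            if p ((x :: y :: t).getD (k + 1) "") then
              (((x :: y :: t).drop (k + 1 + 1)).filter p).map
                (fun z => ((x :: y :: t).getD (k + 1) "", z))
            else [])
          = pairsOf ((y :: t).filter p) := by
        rw [← ih]
        apply List.flatMap_congr
        intro k _
        simp [List.drop_succ_cons]
      rw [show (fun k => (fun k =>
            if p ((x :: y :: t).getD k "") then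
              (((x :: y :: t).drop (k + 1)).filter p).map (fun z => ((x :: y :: t).getD k "", z))
            else []) (k.succ))
          = (fun k =>
            if p ((x :: y :: t).getD (k + 1) "") then
              (((x :: y :: t).drop (k + 1 + 1)).filter p).map
                (fun z => ((x :: y :: t).getD (k + 1) "", z))
            else []) from rfl]
      rw [htail]
      cases hp : p x <;> simp [hp, pairsOf, List.filter_cons]

-- A's per-group double loop, reduced to pairsOf of the filtered group
theorem groupA_eq (vertices : List String) (g : List String) (acc : List (String × String)) :
    (PySem.List.pyRange 0 ((g.length : Int) - 1) 1).foldl (fun acc1 i =>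
        (PySem.List.pyRange (i + 1) (g.length : Int) 1).foldl (fun acc2 j =>
          if vertices.contains (PySem.List.pyGetD g i "") &&
             vertices.contains (PySem.List.pyGetD g j "") then
            acc2 ++ [(PySem.List.pyGetD g i "", PySem.List.pyGetD g j "")]
          else acc2) acc1) acc
      = acc ++ pairsOf (g.filter (fun v => vertices.contains v)) := by
  rw [PySem.List.pyRange_one]
  rw [show ((g.length : Int) - 1 - 0).toNat = g.length - 1 from by omega]
  rw [List.foldl_map]
  have hbody : ∀ (acc1 : List (String × String)) (k : Nat), k ∈ List.range (g.length - 1) →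
      (PySem.List.pyRange ((0 + (k : Int)) + 1) (g.length : Int) 1).foldl (fun acc2 j =>
          if vertices.contains (PySem.List.pyGetD g (0 + (k : Int)) "") &&
             vertices.contains (PySem.List.pyGetD g j "") then
            acc2 ++ [(PySem.List.pyGetD g (0 + (k : Int)) "", PySem.List.pyGetD g j "")]
          else acc2) acc1
      = acc1 ++ (if vertices.contains (g.getD k "") then
          ((g.drop (k + 1)).filter (fun v => vertices.contains v)).map
            (fun y => (g.getD k "", y)) else []) := by
    intro acc1 k _
    rw [PySem.List.foldl_append_if, filter_and_left]
    rw [show PySem.List.pyGetD g (0 + (k : Int)) "" = g.getD k "" from by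
      simp [PySem.List.pyGetD_natCast]]
    by_cases hv : vertices.contains (g.getD k "") = true
    · rw [if_pos hv, if_pos hv]
      rw [filtermap_range g ((0 + (k : Int)) + 1) (by omega)]
      rw [show ((0 + (k : Int)) + 1).toNat = k + 1 from by omega]
    · rw [if_neg hv, if_neg hv]
      simp
  have hr := PySem.List.foldl_congr_mem _ _ _ acc hbody
  exact hr.trans (by rw [PySem.List.foldl_append_eq_flatMap, keyNat])


-- ===== VERDICT (by name: the statement is the Claim_ definition above) =====
theorem get_translation_edges_spec : Claim_equal_get_translation_edges := by
  intro vertices translations _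
  unfold Spec_get_translation_edges get_translation_edges get_translation_edges_alt
  simp only []
  have hA : ∀ (acc : List (String × String)) (g : List String), g ∈ translations →
      (if g.length < 2 then acc
       else (PySem.List.pyRange 0 ((g.length : Int) - 1) 1).foldl (fun acc1 i =>
        (PySem.List.pyRange (i + 1) (g.length : Int) 1).foldl (fun acc2 j =>
          if vertices.contains (PySem.List.pyGetD g i "") &&
             vertices.contains (PySem.List.pyGetD g j "") then
            acc2 ++ [(PySem.List.pyGetD g i "", PySem.List.pyGetD g j "")]
          else acc2) acc1) acc)
      = acc ++ pairsOf (g.filter (fun v => vertices.contains v)) := by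
    intro acc g _
    by_cases h : g.length < 2
    · rw [if_pos h, pairsOf_short _ (le_trans (List.length_filter_le _ _) (by omega))]
      simp
    · rw [if_neg h, groupA_eq]
  have hB : ∀ (acc : List (String × String)) (g : List String), g ∈ translations →
      pyPairsLoop acc (g.filter (fun v => PySem.Set.contains (PySem.Set.ofList vertices) v))
      = acc ++ pairsOf (g.filter (fun v => vertices.contains v)) := by
    intro acc g _
    rw [pyPairsLoop_eq]
    congr 2
    apply List.filter_congr
    intro v _
    rw [contains_ofList]
  rw [PySem.List.foldl_congr_mem _ _ _ _ hA, PySem.List.foldl_congr_mem _ _ _ _ hB]
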